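-- pv_equiv track=rewrite | github.com/OTOYO1020/ChatDev_Intermediate | WareHouse/DD_215__20250518054513/coprime_utils.py | find_coprime_integers
-- ===== SOURCE A (Python) =====
-- from math import gcd
-- from typing import List
--
-- def find_coprime_integers(N: int, M: int, A: List[int]) -> List[int]:
--     '''
--     This function finds all integers k from 1 to M that are coprime with all integers in list A.
--     Parameters:
--     N (int): The number of integers in list A.
--     M (int): The upper limit for k.
--     A (List[int]): The list of positive integers.
--     Returns:
--     List[int]: A list of integers k that are coprime with all integers in A.
--     '''
--     result = []
--     # Handle the case when N is 0
--     if N == 0: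
--         return result  # Return an empty list when N is 0
--     for k in range(1, M + 1):
--         if all(gcd(a, k) == 1 for a in A):
--             result.append(k)
--     return result
-- ===== SOURCE B (Python) =====
-- from math import gcd
-- from typing import List
--
-- def find_coprime_integers(N: int, M: int, A: List[int]) -> List[int]:
--     # Fold A into a single modulus L = lcm(|a| for a in A); k is coprime with
--     # every a iff gcd(k, L) == 1, so the inner all()-scan over A disappears.
--     if N == 0:
--         return []
--     L = 1
--     for a in A:
--         g = gcd(L, a)
--         L = 0 if g == 0 else abs(L * a) // g
--     return [k for k in range(1, M + 1) if gcd(k, L) == 1]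
-- ===== Notes on version B (the rewrite author's own statement) =====
-- stated objective: faster
-- what changed: B folds A once into L = lcm(|a|) and tests each k with a single gcd(k, L) instead of scanning all of A for every k.
import Mathlib
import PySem

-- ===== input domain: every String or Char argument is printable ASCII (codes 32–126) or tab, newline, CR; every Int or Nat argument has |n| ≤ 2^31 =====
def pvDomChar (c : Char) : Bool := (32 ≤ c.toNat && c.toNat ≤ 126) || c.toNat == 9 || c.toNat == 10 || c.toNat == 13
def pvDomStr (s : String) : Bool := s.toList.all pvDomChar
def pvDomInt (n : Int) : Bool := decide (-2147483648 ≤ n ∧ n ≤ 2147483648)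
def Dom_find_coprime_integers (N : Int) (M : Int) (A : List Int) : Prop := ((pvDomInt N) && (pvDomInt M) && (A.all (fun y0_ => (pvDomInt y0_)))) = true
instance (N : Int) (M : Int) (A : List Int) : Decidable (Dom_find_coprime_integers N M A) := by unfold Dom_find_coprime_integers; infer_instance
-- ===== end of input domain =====

-- B replaces the per-k scan of A by one precomputed modulus L = lcm(|a| : a ∈ A) and a single gcd test per k (objective: faster).

-- ===== PORT A =====
def find_coprime_integers (N : Int) (M : Int) (A : List Int) : List Int :=
  if N == 0 then []
  else
    (PySem.List.pyRange 1 (M + 1) 1).foldl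
      (fun result k => if A.all (fun a => Int.gcd a k == 1) then result ++ [k] else result) []

-- ===== PORT B =====
def find_coprime_integers_alt (N : Int) (M : Int) (A : List Int) : List Int :=
  if N == 0 then []
  else
    let L : Int := A.foldl (fun L a =>
      let g : Nat := Int.gcd L a
      if g == 0 then 0 else ((L * a).natAbs / g : Int)) 1
    (PySem.List.pyRange 1 (M + 1) 1).filter (fun k => Int.gcd k L == 1)

-- ===== PRECONDITION & SPEC =====
def Spec_find_coprime_integers (N : Int) (M : Int) (A : List Int) (out : List Int) : Prop := out = find_coprime_integers_alt N M A
instance (N : Int) (M : Int) (A : List Int) (out : List Int) : Decidable (Spec_find_coprime_integers N M A out) := by unfold Spec_find_coprime_integers; infer_instance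

-- ===== CLAIM (what is proved, stated in full; the proofs are below) =====
def Claim_equal_find_coprime_integers : Prop := ∀ (N : Int) (M : Int) (A : List Int), Dom_find_coprime_integers N M A → Spec_find_coprime_integers N M A (find_coprime_integers N M A)

-- ===== LEMMAS AND PROOFS =====

-- B's Int-valued fold is the Nat lcm fold of the absolute values, cast to Int.
theorem lcm_fold_eq (A : List Int) (n : Nat) :
    A.foldl (fun L a =>
      let g : Nat := Int.gcd L a
      if g == 0 then 0 else ((L * a).natAbs / g : Int)) (n : Int)
      = ((A.foldl (fun m a => Nat.lcm m a.natAbs) n : Nat) : Int) := by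
  induction A generalizing n with
  | nil => rfl
  | cons a A ih =>
      simp only [List.foldl_cons]
      have hg : Int.gcd (n : Int) a = Nat.gcd n a.natAbs := by
        simp [Int.gcd]
      have hstep : (if (Int.gcd (n : Int) a == 0) = true then (0 : Int)
          else (((n : Int) * a).natAbs / Int.gcd (n : Int) a : Int))
          = ((Nat.lcm n a.natAbs : Nat) : Int) := by
        by_cases h : Int.gcd (n : Int) a = 0
        · have h2 := Int.gcd_eq_zero_iff.mp h
          have hn : n = 0 := by exact_mod_cast h2.1
          simp [hn, Nat.lcm]
        · simp only [beq_iff_eq, h, if_false]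
          have hna : ((n : Int) * a).natAbs = n * a.natAbs := by
            simp [Int.natAbs_mul]
          rw [hg, hna, Nat.lcm, Int.ofNat_ediv_ofNat]
      rw [hstep, ih]

-- Coprimality with the lcm fold ⇔ coprimality with the seed and every element.
theorem coprime_fold_iff (k : Nat) (A : List Int) (n : Nat) :
    Nat.Coprime k (A.foldl (fun m a => Nat.lcm m a.natAbs) n)
      ↔ (Nat.Coprime k n ∧ ∀ a ∈ A, Nat.Coprime k a.natAbs) := by
  induction A generalizing n with
  | nil => simp [List.foldl_nil]
  | cons a A ih =>
      simp only [List.foldl_cons, ih, List.mem_cons]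
      constructor
      · rintro ⟨h1, h2⟩
        refine ⟨Nat.Coprime.coprime_dvd_right (Nat.dvd_lcm_left _ _) h1,
          fun b hb => ?_⟩
        rcases hb with hb | hb
        · subst hb; exact Nat.Coprime.coprime_dvd_right (Nat.dvd_lcm_right _ _) h1
        · exact h2 b hb
      · rintro ⟨h1, h2⟩
        exact ⟨Nat.Coprime.coprime_dvd_right
            (Nat.lcm_dvd (dvd_mul_right _ _) (dvd_mul_left _ _))
            ((h1.mul_right (h2 a (Or.inl rfl)))),
          fun b hb => h2 b (Or.inr hb)⟩

-- The two per-k tests coincide.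
theorem pred_eq (A : List Int) (k : Int) :
    (A.all (fun a => Int.gcd a k == 1))
      = (Int.gcd k ((A.foldl (fun m a => Nat.lcm m a.natAbs) 1 : Nat) : Int) == 1) := by
  have h : Int.gcd k ((A.foldl (fun m a => Nat.lcm m a.natAbs) 1 : Nat) : Int)
      = Nat.gcd k.natAbs (A.foldl (fun m a => Nat.lcm m a.natAbs) 1) := by
    simp [Int.gcd]
  rw [h]
  by_cases hc : Nat.Coprime k.natAbs (A.foldl (fun m a => Nat.lcm m a.natAbs) 1)
  · have hall := (coprime_fold_iff k.natAbs A 1).mp hc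
    have : ∀ a ∈ A, (Int.gcd a k == 1) = true := by
      intro a ha
      have := hall.2 a ha
      simp [Int.gcd, Nat.Coprime, Nat.gcd_comm] at this ⊢
      omega
    simp [List.all_eq_true.mpr this, hc.gcd_eq_one]
  · have : ¬ ∀ a ∈ A, Nat.Coprime k.natAbs a.natAbs := by
      intro hall
      exact hc ((coprime_fold_iff k.natAbs A 1).mpr ⟨Nat.coprime_one_right _, hall⟩)
    push Not at this
    obtain ⟨a, ha, hna⟩ := this
    have h1 : (A.all (fun a => Int.gcd a k == 1)) = false := by
      simp only [] at *
      refine Bool.eq_false_iff.mpr ?_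
      intro hall
      rw [List.all_eq_true] at hall
      have := hall a ha
      apply hna
      simp [Int.gcd] at this
      simpa [Nat.Coprime, Nat.gcd_comm] using this
    rw [h1]
    have h2 : Nat.gcd k.natAbs (A.foldl (fun m a => Nat.lcm m a.natAbs) 1) ≠ 1 := hc
    simp [h2]

-- ===== VERDICT (by name: the statement is the Claim_ definition above) =====
theorem find_coprime_integers_spec : Claim_equal_find_coprime_integers := by
  intro N M A _
  unfold Spec_find_coprime_integers find_coprime_integers find_coprime_integers_alt
  by_cases hN : N == 0
  · simp [hN]
  · simp only [hN]
    rw [show ((1 : Int) : Int) = ((1 : Nat) : Int) from rfl, lcm_fold_eq]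
    rw [PySem.List.foldl_append_if_eq_filter]
    simp only [List.nil_append]
    exact List.filter_congr (fun k _ => pred_eq A k)
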